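-- pv_equiv track=rewrite | github.com/Pickleboyonline/maomi | src/maomi/lsp/_signature.py | _is_inside_string
-- ===== SOURCE A (Python) =====
-- def _is_inside_string(line_text: str, col: int) -> int | None:
--     """Check if ``col`` is inside a string literal in *line_text*.
--
--     Returns the index of the opening quote if inside a string, else ``None``.
--     """
--     in_string = False
--     string_start = -1
--     i = 0
--     while i < len(line_text):
--         ch = line_text[i]
--         if ch == '"' and (i == 0 or line_text[i - 1] != '\\'):
--             if not in_string:
--                 in_string = True
--                 string_start = i
--             else:
--                 if col > string_start and col <= i:
--                     return string_start
--                 in_string = False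
--                 string_start = -1
--         if i == col and in_string:
--             return string_start
--         i += 1
--     # col is past end of processed chars but still inside an unclosed string
--     if in_string and col > string_start:
--         return string_start
--     return None
-- ===== SOURCE B (Python) =====
-- def _is_inside_string(line_text: str, col: int) -> int | None:
--     """Check if ``col`` is inside a string literal in *line_text*.
--
--     Two-pass version: first collect the delimiter-quote positions,
--     then pair them into spans and compare ``col`` against each span.
--     """
--     quotes = []
--     prev = None
--     for i, ch in enumerate(line_text):
--         if ch == '"' and (i == 0 or prev != '\\'):
--             quotes.append(i)
--         prev = ch
--     k = 0
--     while k + 1 < len(quotes):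
--         if quotes[k] <= col <= quotes[k + 1]:
--             return quotes[k]
--         k += 2
--     if len(quotes) % 2 == 1 and col >= quotes[-1]:
--         return quotes[-1]
--     return None
-- ===== Notes on version B (the rewrite author's own statement) =====
-- stated objective: alternative
-- what changed: Replaces A's single-pass in_string/string_start state machine with three return sites by a two-phase plan: collect the delimiter-quote indices, then walk them two at a time as (open, close) spans compared numerically against col, with a trailing unmatched quote treated as an unclosed string.
import Mathlib
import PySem

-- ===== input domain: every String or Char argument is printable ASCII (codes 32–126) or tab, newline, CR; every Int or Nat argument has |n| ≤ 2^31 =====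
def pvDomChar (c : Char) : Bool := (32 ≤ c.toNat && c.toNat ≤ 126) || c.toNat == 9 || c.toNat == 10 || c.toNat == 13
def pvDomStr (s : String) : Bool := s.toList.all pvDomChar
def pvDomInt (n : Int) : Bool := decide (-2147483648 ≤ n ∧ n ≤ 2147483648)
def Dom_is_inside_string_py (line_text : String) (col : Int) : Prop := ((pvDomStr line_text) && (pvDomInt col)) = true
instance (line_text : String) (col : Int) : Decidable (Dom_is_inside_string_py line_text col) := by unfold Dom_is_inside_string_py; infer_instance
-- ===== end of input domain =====

-- B is an alternative decomposition of A (collect quote positions, then pair them into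
-- spans), same asymptotic cost; the proved claim is return-value equality on all inputs.

-- ===== PORT A =====
-- A's while-loop: state machine over the characters with (in_string, string_start);
-- `prev` is line_text[i-1] (none at i = 0), `i` the current index.
def pvLoopA (col : Int) (cs : List Char) (prev : Option Char) (i : Nat) (inS : Bool) (st : Int) : Option Int :=
  match cs with
  | [] => if inS && decide (col > st) then some st else none
  | c :: rest =>
    if c = '"' ∧ (i = 0 ∨ prev ≠ some '\\') then
      if !inS then
        -- open the string (string_start := i); then A's `i == col and in_string` check
        if (i : Int) = col then some (i : Int)
        else pvLoopA col rest (some c) (i + 1) true (i : Int)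
      else
        if col > st ∧ col ≤ (i : Int) then some st
        else pvLoopA col rest (some c) (i + 1) false (-1)
    else
      if (i : Int) = col ∧ inS = true then some st
      else pvLoopA col rest (some c) (i + 1) inS st

def is_inside_string_py (line_text : String) (col : Int) : Option Int :=
  pvLoopA col line_text.toList none 0 false (-1)

-- ===== PORT B =====
-- pass 1 of Source B: indices i with line_text[i] = '"' and (i = 0 or line_text[i-1] ≠ '\\')
def pvQuotes (prev : Option Char) (i : Nat) : List Char → List Int
  | [] => []
  | c :: rest =>
    if c = '"' ∧ (i = 0 ∨ prev ≠ some '\\') then (i : Int) :: pvQuotes (some c) (i + 1) rest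
    else pvQuotes (some c) (i + 1) rest

-- pass 2 of Source B: walk the quote list two at a time; a trailing unmatched quote s
-- is an unclosed string (return s when col ≥ s)
def pvPairScan (col : Int) : List Int → Option Int
  | s :: e :: rest => if s ≤ col ∧ col ≤ e then some s else pvPairScan col rest
  | [s] => if col ≥ s then some s else none
  | [] => none

def is_inside_string_py_alt (line_text : String) (col : Int) : Option Int :=
  pvPairScan col (pvQuotes none 0 line_text.toList)

-- ===== PRECONDITION & SPEC =====
def Spec_is_inside_string_py (line_text : String) (col : Int) (out : Option Int) : Prop := out = is_inside_string_py_alt line_text col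
instance (line_text : String) (col : Int) (out : Option Int) : Decidable (Spec_is_inside_string_py line_text col out) := by unfold Spec_is_inside_string_py; infer_instance

-- ===== CLAIM (what is proved, stated in full; the proofs are below) =====
def Claim_equal_is_inside_string_py : Prop := ∀ (line_text : String) (col : Int), Dom_is_inside_string_py line_text col → Spec_is_inside_string_py line_text col (is_inside_string_py line_text col)

-- ===== LEMMAS AND PROOFS =====

-- every collected quote index is ≥ the start index
lemma pvQuotes_ge (cs : List Char) : ∀ (prev : Option Char) (i : Nat) (q : Int),
    q ∈ pvQuotes prev i cs → (i : Int) ≤ q := by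
  induction cs with
  | nil => intro prev i q h; simp [pvQuotes] at h
  | cons c rest ih =>
    intro prev i q h
    simp only [pvQuotes] at h
    split at h
    · rcases List.mem_cons.mp h with h | h
      · omega
      · have := ih (some c) (i + 1) q h; push_cast at this ⊢; omega
    · have := ih (some c) (i + 1) q h; push_cast at this ⊢; omega

-- the loop invariant: A's state machine computes B's pair scan.
-- Out of a string, A's remaining run equals the pair scan of the remaining quotes;
-- inside a string opened at st (with col not among the already-checked columns
-- st..i-1), it equals the pair scan with st prepended as the pending opening quote.
lemma pvLoop_eq (cs : List Char) : ∀ (prev : Option Char) (i : Nat) (col : Int),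
    (pvLoopA col cs prev i false (-1) = pvPairScan col (pvQuotes prev i cs)) ∧
    (∀ st : Int, st < (i : Int) → ¬((st : Int) ≤ col ∧ col < (i : Int)) →
      pvLoopA col cs prev i true st = pvPairScan col (st :: pvQuotes prev i cs)) := by
  induction cs with
  | nil =>
    intro prev i col
    refine ⟨rfl, fun st h1 h2 => ?_⟩
    simp only [pvLoopA, pvQuotes, pvPairScan, Bool.true_and]
    split_ifs with h <;> simp_all <;> omega
  | cons c rest ih =>
    intro prev i col
    constructor
    · -- out-of-string state
      simp only [pvLoopA, pvQuotes]
      by_cases hd : c = '"' ∧ (i = 0 ∨ prev ≠ some '\\')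
      · rw [if_pos hd, if_pos hd]
        simp only [Bool.not_false, if_true]
        by_cases hc : (i : Int) = col
        · -- delimiter, opens at i, col = i : both return i
          rw [if_pos hc]
          cases hq : pvQuotes (some c) (i + 1) rest with
          | nil => simp [pvPairScan]; omega
          | cons e tail =>
            have he : (i : Int) + 1 ≤ e := by
              have := pvQuotes_ge rest (some c) (i + 1) e (hq ▸ List.mem_cons_self ..)
              push_cast at this; omega
            simp only [pvPairScan]
            rw [if_pos ⟨by omega, by omega⟩]
        · -- delimiter, opens at i, col ≠ i : recurse in-string
          rw [if_neg hc]
          exact (ih (some c) (i + 1) col).2 (i : Int) (by push_cast; omega)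
            (by push_cast; omega)
      · -- not a delimiter: the i = col check fails (inS = false), recurse
        rw [if_neg hd, if_neg hd, if_neg (by simp)]
        exact (ih (some c) (i + 1) col).1
    · -- in-string state
      intro st hst hcol
      simp only [pvLoopA, pvQuotes]
      by_cases hd : c = '"' ∧ (i = 0 ∨ prev ≠ some '\\')
      · rw [if_pos hd, if_pos hd]
        simp only [Bool.not_true, Bool.false_eq_true, if_false]
        by_cases hc : col > st ∧ col ≤ (i : Int)
        · -- closing quote, col in (st, i] : A returns st, B's head span fires
          rw [if_pos hc]
          simp only [pvPairScan]
          rw [if_pos ⟨by omega, hc.2⟩]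
        · -- closing quote, col outside the span: B's head span does not fire
          rw [if_neg hc]
          simp only [pvPairScan]
          rw [if_neg (by omega)]
          exact (ih (some c) (i + 1) col).1
      · rw [if_neg hd, if_neg hd]
        by_cases hc : (i : Int) = col
        · -- not a delimiter, i = col : A returns st; B: st ≤ col < every later quote
          rw [if_pos ⟨hc, trivial⟩]
          cases hq : pvQuotes (some c) (i + 1) rest with
          | nil => simp [pvPairScan]; omega
          | cons e tail =>
            have he : (i : Int) + 1 ≤ e := by
              have := pvQuotes_ge rest (some c) (i + 1) e (hq ▸ List.mem_cons_self ..)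
              push_cast at this; omega
            simp only [pvPairScan]
            rw [if_pos ⟨by omega, by omega⟩]
        · -- not a delimiter, i ≠ col : recurse, still in-string
          rw [if_neg (by simp [hc])]
          exact (ih (some c) (i + 1) col).2 st (by push_cast; omega)
            (by push_cast at hcol ⊢; omega)

-- ===== VERDICT (by name: the statement is the Claim_ definition above) =====
theorem is_inside_string_py_spec : Claim_equal_is_inside_string_py := by
  intro line_text col _
  unfold Spec_is_inside_string_py is_inside_string_py is_inside_string_py_alt
  exact (pvLoop_eq line_text.toList none 0 col).1
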